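-- pv_equiv track=rewrite | github.com/0xCUB3/mcode | deploy/k8s/oc_bench_sweep.py | _is_transient_oc_error
-- ===== SOURCE A (Python) =====
-- def _is_transient_oc_error(text: str) -> bool:
--     haystack = text.lower()
--     needles = (
--         "unable to connect to the server",
--         "no such host",
--         "dial tcp",
--         "i/o timeout",
--         "context deadline exceeded",
--         "connection refused",
--         "tls handshake timeout",
--         "server closed idle connection",
--     )
--     return any(needle in haystack for needle in needles)
-- ===== SOURCE B (Python) =====
-- import re
--
-- _TRANSIENT_PATTERN = re.compile(
--     "|".join(
--         re.escape(needle)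
--         for needle in (
--             "unable to connect to the server",
--             "no such host",
--             "dial tcp",
--             "i/o timeout",
--             "context deadline exceeded",
--             "connection refused",
--             "tls handshake timeout",
--             "server closed idle connection",
--         )
--     )
-- )
--
--
-- def _is_transient_oc_error(text: str) -> bool:
--     return _TRANSIENT_PATTERN.search(text.lower()) is not None
-- ===== Notes on version B (the rewrite author's own statement) =====
-- stated objective: idiomatic
-- what changed: Replaces the eight-way any(needle in haystack) loop with one precompiled regex alternation of the escaped needles searched once over the lowered text.
import Mathlib
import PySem

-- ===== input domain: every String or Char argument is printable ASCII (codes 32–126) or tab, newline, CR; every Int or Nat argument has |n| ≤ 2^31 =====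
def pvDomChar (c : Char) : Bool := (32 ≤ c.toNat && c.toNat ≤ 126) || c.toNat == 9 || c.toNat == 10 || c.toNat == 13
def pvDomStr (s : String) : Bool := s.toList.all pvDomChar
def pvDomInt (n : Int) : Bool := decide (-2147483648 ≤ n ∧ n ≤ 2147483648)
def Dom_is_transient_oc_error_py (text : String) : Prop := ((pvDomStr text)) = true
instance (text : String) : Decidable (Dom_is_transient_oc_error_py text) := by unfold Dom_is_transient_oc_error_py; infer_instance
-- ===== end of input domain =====

-- B replaces A's eight independent `needle in haystack` scans with one precompiled
-- regex alternation of the escaped needles, searched once over the lowered text.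

def pvNeedles : List String :=
  [ "unable to connect to the server"
  , "no such host"
  , "dial tcp"
  , "i/o timeout"
  , "context deadline exceeded"
  , "connection refused"
  , "tls handshake timeout"
  , "server closed idle connection" ]

-- ===== PORT A =====
-- any(needle in haystack for needle in needles)
def is_transient_oc_error_py (text : String) : Bool :=
  let haystack := PySem.Str.lower text
  pvNeedles.any (fun needle => PySem.Str.isIn needle haystack)

-- ===== PORT B =====
-- bool(pattern.search(haystack)) for the compiled alternation of escaped literal needles:
-- re.search scans positions left to right and at each position tries the alternatives in
-- order, so a match exists iff at some index some needle is a prefix of the rest; this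
-- position scan is exact for an alternation of fixed escaped literals.
def is_transient_oc_error_py_alt (text : String) : Bool :=
  let haystack := PySem.Str.lower text
  (List.range haystack.toList.length).any (fun i =>
    pvNeedles.any (fun n => PySem.Chars.startswith (haystack.toList.drop i) n.toList))

-- ===== PRECONDITION & SPEC =====
def Spec_is_transient_oc_error_py (text : String) (out : Bool) : Prop := out = is_transient_oc_error_py_alt text
instance (text : String) (out : Bool) : Decidable (Spec_is_transient_oc_error_py text out) := by unfold Spec_is_transient_oc_error_py; infer_instance

-- ===== CLAIM (what is proved, stated in full; the proofs are below) =====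
def Claim_equal_is_transient_oc_error_py : Prop := ∀ (text : String), Dom_is_transient_oc_error_py text → Spec_is_transient_oc_error_py text (is_transient_oc_error_py text)

-- ===== LEMMAS AND PROOFS =====

-- the position scan finds a nonempty needle iff it occurs as a substring
lemma scan_eq_isIn (s sub : List Char) (hne : sub ≠ []) :
    (List.range s.length).any (fun i => PySem.Chars.startswith (s.drop i) sub)
      = PySem.Chars.isIn sub s := by
  rw [Bool.eq_iff_iff, List.any_eq_true, ← PySem.Chars.exists_prefix_drop_iff_isIn]
  constructor
  · rintro ⟨i, -, h⟩
    exact ⟨i, (PySem.Chars.startswith_iff _ _).mp h⟩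
  · rintro ⟨j, hj⟩
    refine ⟨j, List.mem_range.mpr ?_, (PySem.Chars.startswith_iff _ _).mpr hj⟩
    by_contra hge
    have : s.drop j = [] := List.drop_eq_nil_of_le (by omega)
    rw [this, List.prefix_nil] at hj
    exact hne hj

lemma needles_ne_nil : ∀ n ∈ pvNeedles, n.toList ≠ [] := by decide

-- ===== VERDICT (by name: the statement is the Claim_ definition above) =====
theorem is_transient_oc_error_py_spec : Claim_equal_is_transient_oc_error_py := by
  intro text _
  unfold Spec_is_transient_oc_error_py is_transient_oc_error_py is_transient_oc_error_py_alt
  simp only [PySem.Str.isIn_eq]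
  set h := (PySem.Str.lower text).toList with hh
  rw [Bool.eq_iff_iff, List.any_eq_true, List.any_eq_true]
  constructor
  · rintro ⟨n, hn, hin⟩
    have := scan_eq_isIn h n.toList (needles_ne_nil n hn)
    rw [← this, List.any_eq_true] at hin
    obtain ⟨i, hi, hsw⟩ := hin
    exact ⟨i, hi, List.any_eq_true.mpr ⟨n, hn, hsw⟩⟩
  · rintro ⟨i, hi, hin⟩
    obtain ⟨n, hn, hsw⟩ := List.any_eq_true.mp hin
    refine ⟨n, hn, ?_⟩
    rw [← scan_eq_isIn h n.toList (needles_ne_nil n hn), List.any_eq_true]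
    exact ⟨i, hi, hsw⟩
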